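-- pv_equiv track=rewrite | github.com/Mr-Harsh-Dixit/Project_Euler_Solutions | Python/Problem_086.py | euler_86
-- ===== SOURCE A (Python) =====
-- import math
--
-- def is_square(n: int) -> bool:
--     r = math.isqrt(n)
--     return r * r == n
--
-- def euler_86(target: int = 1_000_000) -> int:
--     total = 0
--     M = 0
--
--     while total <= target:
--         M += 1
--         z = M
--         zz = z * z
--         for s in range(2, 2 * z + 1):
--             if is_square(s * s + zz):
--                 lo = max(1, s - z)
--                 hi = min(z, s // 2)
--                 if hi >= lo:
--                     total += hi - lo + 1
--
--     return M
-- ===== SOURCE B (Python) =====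
-- import math
--
-- def euler_86(target: int = 1_000_000) -> int:
--     # Instead of scanning every path-sum s and testing s*s + z*z for
--     # squareness, enumerate the possible integer path lengths (hypotenuses)
--     # q with z < q <= sqrt(5)*z, recover s = isqrt(q*q - z*z), and when it
--     # is exact count the cuboid splits a of that solution one by one.
--     total = 0
--     M = 0
--     while total <= target:
--         M += 1
--         z = M
--         zz = z * z
--         for q in range(z + 1, math.isqrt(5 * zz) + 1):
--             d = q * q - zz
--             s = math.isqrt(d)
--             if s * s == d:
--                 for a in range(max(1, s - z), min(z, s // 2) + 1):
--                     total += 1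
--     return M
-- ===== Notes on version B (the rewrite author's own statement) =====
-- stated objective: faster
-- what changed: Per cuboid size z, B enumerates candidate integer path lengths (hypotenuses) q in (z, sqrt(5)*z] and recovers s = isqrt(q^2-z^2), counting each a-split of a solution one by one, instead of A's scan over all path-sums s in [2,2z] with an is_square test and a closed-form interval-length count.
import Mathlib
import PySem

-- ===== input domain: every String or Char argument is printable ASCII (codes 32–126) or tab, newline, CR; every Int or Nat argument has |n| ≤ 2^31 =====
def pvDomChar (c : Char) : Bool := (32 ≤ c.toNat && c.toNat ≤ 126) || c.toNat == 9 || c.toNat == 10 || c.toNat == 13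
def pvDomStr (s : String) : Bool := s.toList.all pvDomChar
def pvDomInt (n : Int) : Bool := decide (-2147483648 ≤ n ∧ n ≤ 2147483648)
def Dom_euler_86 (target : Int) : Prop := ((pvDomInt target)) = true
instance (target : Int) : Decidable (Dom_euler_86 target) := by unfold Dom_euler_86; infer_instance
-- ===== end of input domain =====

-- B enumerates candidate integer path lengths (hypotenuses) q ∈ (z, √5·z] per size z,
-- recovering s = isqrt(q²−z²) and counting each a-split one by one, instead of A's
-- scan over all path-sums s ∈ [2,2z] with a squareness test and a closed-form count.
-- The while loops are ported with a fuel bound that is never reached on the stated domain.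

-- ===== PORT A =====
-- port of is_square (n ≥ 0 at every call site, where math.isqrt = Int.sqrt)
def isSquare (n : Int) : Bool := (Int.sqrt n) * (Int.sqrt n) == n

-- inner 'for s in range(2, 2*z+1)' loop of A, threading total
def innerA (z total : Int) : Int :=
  (PySem.List.pyRange 2 (2 * z + 1) 1).foldl (fun total s =>
    if isSquare (s * s + z * z) then
      let lo := max 1 (s - z)
      let hi := min z (PySem.Int.floordiv s 2)
      if hi ≥ lo then total + (hi - lo + 1) else total
    else total) total

-- the 'while total <= target' loop of A (fuel only makes it total; see euler_86)
def loopA (target : Int) : Nat → Int → Int → Int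
  | 0, _, M => M
  | fuel + 1, total, M =>
    if total ≤ target then loopA target fuel (innerA (M + 1) total) (M + 1) else M

def euler_86 (target : Int) : Int := loopA target (3 * (target.toNat + 2)) 0 0

-- ===== PORT B =====
-- inner 'for q in range(z+1, isqrt(5*zz)+1)' loop of B with its unit-count a-loop
def innerB (z total : Int) : Int :=
  (PySem.List.pyRange (z + 1) (Int.sqrt (5 * (z * z)) + 1) 1).foldl (fun total q =>
    let d := q * q - z * z
    let s := Int.sqrt d
    if s * s == d then
      (PySem.List.pyRange (max 1 (s - z)) (min z (PySem.Int.floordiv s 2) + 1) 1).foldl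
        (fun total _ => total + 1) total
    else total) total

def loopB (target : Int) : Nat → Int → Int → Int
  | 0, _, M => M
  | fuel + 1, total, M =>
    if total ≤ target then loopB target fuel (innerB (M + 1) total) (M + 1) else M

def euler_86_alt (target : Int) : Int := loopB target (3 * (target.toNat + 2)) 0 0

-- ===== PRECONDITION & SPEC =====
def Spec_euler_86 (target : Int) (out : Int) : Prop := out = euler_86_alt target
instance (target : Int) (out : Int) : Decidable (Spec_euler_86 target out) := by unfold Spec_euler_86; infer_instance

-- ===== CLAIM (what is proved, stated in full; the proofs are below) =====
def Claim_equal_euler_86 : Prop := ∀ (target : Int), Dom_euler_86 target → Spec_euler_86 target (euler_86 target)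

-- ===== LEMMAS AND PROOFS =====

-- A's interval-length summand (with Python floor division)
def lenA (z s : Int) : Int :=
  if min z (PySem.Int.floordiv s 2) ≥ max 1 (s - z) then
    min z (PySem.Int.floordiv s 2) - max 1 (s - z) + 1 else 0

def gAf (z s : Int) : Int := if isSquare (s * s + z * z) then lenA z s else 0

-- B's per-hit unit count, as the length of the a-range
def lenB (z s : Int) : Int := ((min z (PySem.Int.floordiv s 2) + 1 - max 1 (s - z)).toNat : Int)

def gQ (z q : Int) : Int :=
  if isSquare (q * q - z * z) then lenB z (Int.sqrt (q * q - z * z)) else 0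

-- Int.sqrt bracketing helpers
lemma int_sqrt_le {n : Int} (hn : 0 ≤ n) : Int.sqrt n * Int.sqrt n ≤ n := by
  have h := Nat.sqrt_le n.toNat
  have : ((Nat.sqrt n.toNat * Nat.sqrt n.toNat : Nat) : Int) ≤ ((n.toNat : Nat) : Int) := by
    exact_mod_cast h
  simpa [Int.sqrt, Int.toNat_of_nonneg hn] using this

lemma int_le_sqrt {a n : Int} (ha : 0 ≤ a) (h : a * a ≤ n) : a ≤ Int.sqrt n := by
  have hn : 0 ≤ n := le_trans (mul_self_nonneg a) h
  have h1 : a.toNat * a.toNat ≤ n.toNat := by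
    have : ((a.toNat * a.toNat : Nat) : Int) ≤ ((n.toNat : Nat) : Int) := by
      push_cast
      rw [Int.toNat_of_nonneg ha, Int.toNat_of_nonneg hn]
      exact h
    exact_mod_cast this
  have h2 : a.toNat ≤ Nat.sqrt n.toNat := Nat.le_sqrt.mpr h1
  calc a = (a.toNat : Int) := (Int.toNat_of_nonneg ha).symm
    _ ≤ (Nat.sqrt n.toNat : Int) := by exact_mod_cast h2
    _ = Int.sqrt n := rfl

lemma int_sqrt_mul_self {a : Int} (ha : 0 ≤ a) : Int.sqrt (a * a) = a := by
  rw [Int.sqrt_eq, Int.natAbs_of_nonneg ha]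

-- list sum over a Python range as a Finset sum over an integer interval
lemma sum_pyRange_eq (a b : Int) (g : Int → Int) :
    ((PySem.List.pyRange a b 1).map g).sum = ∑ s ∈ Finset.Icc a (b - 1), g s := by
  rw [← List.sum_toFinset _ (PySem.List.nodup_pyRange_one a b)]
  apply Finset.sum_congr _ (fun _ _ => rfl)
  ext x
  simp [PySem.List.mem_pyRange_one, Finset.mem_Icc]

lemma foldl_one (l : List Int) (t : Int) :
    l.foldl (fun acc _ => acc + 1) t = t + l.length := by
  induction l generalizing t with
  | nil => simp
  | cons x xs ih => simp [List.foldl_cons, ih]; omega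

lemma innerA_eq (z total : Int) :
    innerA z total = total + ∑ s ∈ Finset.Icc 2 (2 * z), gAf z s := by
  unfold innerA
  have h : (fun (total s : Int) =>
      if isSquare (s * s + z * z) then
        let lo := max 1 (s - z)
        let hi := min z (PySem.Int.floordiv s 2)
        if hi ≥ lo then total + (hi - lo + 1) else total
      else total) = fun total s => total + gAf z s := by
    funext t s
    by_cases h1 : isSquare (s * s + z * z) <;> simp [h1, gAf, lenA] <;> split_ifs <;> omega
  rw [h, PySem.List.foldl_add, sum_pyRange_eq]
  norm_num

lemma innerB_eq (z total : Int) :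
    innerB z total = total + ∑ q ∈ Finset.Icc (z + 1) (Int.sqrt (5 * (z * z))), gQ z q := by
  unfold innerB
  have h : (fun (total q : Int) =>
      let d := q * q - z * z
      let s := Int.sqrt d
      if s * s == d then
        (PySem.List.pyRange (max 1 (s - z)) (min z (PySem.Int.floordiv s 2) + 1) 1).foldl
          (fun total _ => total + 1) total
      else total) = fun total q => total + gQ z q := by
    funext t q
    by_cases h1 : isSquare (q * q - z * z)
    · have h1' : (Int.sqrt (q * q - z * z) * Int.sqrt (q * q - z * z) == q * q - z * z) = true := h1
      simp only [h1', if_true, gQ, h1, foldl_one, PySem.List.length_pyRange_one, lenB]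
    · have h1' : (Int.sqrt (q * q - z * z) * Int.sqrt (q * q - z * z) == q * q - z * z) = false := by
        simpa [isSquare] using h1
      simp [h1', gQ, h1]
  rw [h, PySem.List.foldl_add, sum_pyRange_eq]
  norm_num

-- the change of enumeration: path-sums s with s²+z² square ↔ hypotenuses q with q²−z² square
lemma main_sum (z : Int) (hz : 1 ≤ z) :
    ∑ s ∈ Finset.Icc 2 (2 * z), gAf z s
      = ∑ q ∈ Finset.Icc (z + 1) (Int.sqrt (5 * (z * z))), gQ z q := by
  unfold gAf gQ
  rw [← Finset.sum_filter, ← Finset.sum_filter]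
  apply Finset.sum_nbij' (i := fun s => Int.sqrt (s * s + z * z))
    (j := fun q => Int.sqrt (q * q - z * z))
  · -- maps S into Q
    intro s hs
    rw [Finset.mem_filter, Finset.mem_Icc] at hs ⊢
    obtain ⟨⟨hs2, hsz⟩, hsq⟩ := hs
    set k := Int.sqrt (s * s + z * z) with hk
    have hknn : 0 ≤ k := Int.sqrt_nonneg _
    have hkk : k * k = s * s + z * z := by simpa [isSquare] using hsq
    refine ⟨⟨?_, ?_⟩, ?_⟩
    · nlinarith
    · exact int_le_sqrt hknn (by nlinarith)
    · have h2 : k * k - z * z = s * s := by omega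
      rw [h2]
      simp [isSquare, int_sqrt_mul_self (show (0:Int) ≤ s by omega)]
  · -- maps Q into S
    intro q hq
    rw [Finset.mem_filter, Finset.mem_Icc] at hq ⊢
    obtain ⟨⟨hq1, hq2⟩, hqs⟩ := hq
    set s := Int.sqrt (q * q - z * z) with hs
    have hsnn : 0 ≤ s := Int.sqrt_nonneg _
    have hss : s * s = q * q - z * z := by simpa [isSquare] using hqs
    have hqnn : 0 ≤ q := by omega
    have hq2' : q * q ≤ 5 * (z * z) :=
      le_trans (mul_le_mul hq2 hq2 hqnn (Int.sqrt_nonneg _)) (int_sqrt_le (by nlinarith))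
    refine ⟨⟨?_, ?_⟩, ?_⟩
    · nlinarith
    · nlinarith
    · have h2 : s * s + z * z = q * q := by omega
      rw [h2]
      simp [isSquare, int_sqrt_mul_self hqnn]
  · -- left inverse
    intro s hs
    rw [Finset.mem_filter, Finset.mem_Icc] at hs
    obtain ⟨⟨hs2, hsz⟩, hsq⟩ := hs
    have hkk : Int.sqrt (s * s + z * z) * Int.sqrt (s * s + z * z) = s * s + z * z := by
      simpa [isSquare] using hsq
    have : Int.sqrt (s * s + z * z) * Int.sqrt (s * s + z * z) - z * z = s * s := by omega
    rw [this, int_sqrt_mul_self (by omega)]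
  · -- right inverse
    intro q hq
    rw [Finset.mem_filter, Finset.mem_Icc] at hq
    obtain ⟨⟨hq1, hq2⟩, hqs⟩ := hq
    have hss : Int.sqrt (q * q - z * z) * Int.sqrt (q * q - z * z) = q * q - z * z := by
      simpa [isSquare] using hqs
    have : Int.sqrt (q * q - z * z) * Int.sqrt (q * q - z * z) + z * z = q * q := by omega
    rw [this, int_sqrt_mul_self (by omega)]
  · -- summand equality
    intro s hs
    rw [Finset.mem_filter, Finset.mem_Icc] at hs
    obtain ⟨⟨hs2, hsz⟩, hsq⟩ := hs
    have hkk : Int.sqrt (s * s + z * z) * Int.sqrt (s * s + z * z) = s * s + z * z := by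
      simpa [isSquare] using hsq
    have h1 : Int.sqrt (s * s + z * z) * Int.sqrt (s * s + z * z) - z * z = s * s := by omega
    rw [h1, int_sqrt_mul_self (by omega)]
    unfold lenA lenB
    generalize PySem.Int.floordiv s 2 = w
    split_ifs <;> omega

lemma inner_eq (z total : Int) (hz : 1 ≤ z) : innerA z total = innerB z total := by
  rw [innerA_eq, innerB_eq, main_sum z hz]

lemma loop_eq (target : Int) : ∀ (fuel : Nat) (total M : Int), 0 ≤ M →
    loopA target fuel total M = loopB target fuel total M := by
  intro fuel
  induction fuel with
  | zero => intro total M _; rfl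
  | succ n ih =>
    intro total M hM
    simp only [loopA, loopB, inner_eq (M + 1) total (by omega)]
    split
    · exact ih _ _ (by omega)
    · rfl

-- ===== VERDICT (by name: the statement is the Claim_ definition above) =====
theorem euler_86_spec : Claim_equal_euler_86 := by
  intro target _
  unfold Spec_euler_86 euler_86 euler_86_alt
  exact loop_eq target _ 0 0 le_rfl
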